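-- pv_equiv track=rewrite | github.com/Tiyanak/digital-signature-algorithms | fileHelper.py | get_hex16_value
-- ===== SOURCE A (Python) =====
-- def get_hexc_value(name, keydata):
--     ## Used for retrieving various data. Returns all of the data associated
--     ## with the key (or name), but merged in a single string.
--     if name not in keydata:
--         return None
--     return ''.join(keydata[name])
--
-- def get_hex16_value(name, keydata):
--     ## Used for retriving various data that represents hexadecimal numbers.
--     ## Returns a list of positive decimal numbers that correspond to 4-digit
--     ## hexadecimal numbers.
--     if name not in keydata:
--         return None
--     data = get_hexc_value(name, keydata)
--     length = len(data)
--     if length % 4 != 0: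
--         data = data.zfill(length + 4 - length % 4)
--     position = 0
--     bit16 = []
--     while position < len(data):
--         bit16.append(int(data[position:position + 4], 16))
--         position += 4
--     return bit16
-- ===== SOURCE B (Python) =====
-- def get_hex16_value(name, keydata):
--     if name not in keydata:
--         return None
--     data = ''.join(keydata[name])
--     bit16 = []
--     end = len(data)
--     while end > 0:
--         bit16.append(int(data[max(0, end - 4):end], 16))
--         end -= 4
--     bit16.reverse()
--     return bit16
-- ===== Notes on version B (the rewrite author's own statement) =====
-- stated objective: alternative
-- what changed: B never pads: instead of zfill-ing the whole joined string and scanning it left-to-right, it consumes the string from the RIGHT end with a decreasing index, parses data[max(0,end-4):end] per step, builds the chunk list back-to-front and reverses it once at the end.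
-- outside the precondition, e.g. on get_hex16_value('k', {'k': ['+_c']}): A returns [12], B raises ValueError; on get_hex16_value('k', {'k': [' 123']}): A returns [291], B returns [291]
import Mathlib
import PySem

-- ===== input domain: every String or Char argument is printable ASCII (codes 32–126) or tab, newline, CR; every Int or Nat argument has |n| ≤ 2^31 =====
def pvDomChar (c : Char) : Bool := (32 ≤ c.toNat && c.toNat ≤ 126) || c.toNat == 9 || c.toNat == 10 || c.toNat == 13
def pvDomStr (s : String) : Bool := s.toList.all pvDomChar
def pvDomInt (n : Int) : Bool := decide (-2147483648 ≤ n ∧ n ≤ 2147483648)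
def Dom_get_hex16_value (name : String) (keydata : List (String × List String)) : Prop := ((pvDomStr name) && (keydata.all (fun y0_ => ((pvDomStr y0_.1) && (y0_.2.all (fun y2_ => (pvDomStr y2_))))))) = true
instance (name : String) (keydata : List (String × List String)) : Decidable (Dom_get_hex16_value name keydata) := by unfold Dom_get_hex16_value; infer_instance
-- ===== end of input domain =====

-- B never pads: it consumes the joined hex string from the right end with a decreasing index,
-- building the chunk list back-to-front and reversing once, instead of zfill + left-to-right scan.


-- ===== PORT A =====
-- ''.join(keydata[name]) behind the 'name not in keydata' guard (helper get_hexc_value of A)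
def get_hexc_value (name : String) (keydata : List (String × List String)) : Option String :=
  match List.lookup name keydata with
  | none => none
  | some xs => some (PySem.Str.join "" xs)

-- A's while loop: append int(data[position:position+4], 16), position += 4; none = ValueError
def hex16LoopA (cs : List Char) (acc : List Int) : Option (List Int) :=
  if cs.isEmpty then some acc
  else
    match PySem.Int.ofCharsBase? (cs.take 4) 16 with
    | none => none
    | some v => hex16LoopA (cs.drop 4) (acc ++ [v])
termination_by cs.length
decreasing_by cases cs <;> simp_all

def get_hex16_value (name : String) (keydata : List (String × List String)) : Option (List Int) :=
  match List.lookup name keydata with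
  | none => none
  | some _ =>
    match get_hexc_value name keydata with
    | none => none   -- unreachable: the guard above ensures the key is present
    | some data =>
      let cs := data.toList
      let length := cs.length
      let cs := if length % 4 ≠ 0 then PySem.Chars.zfill cs ((length : Int) + 4 - (length : Int) % 4) else cs
      hex16LoopA cs []

-- ===== PORT B =====
-- B's while loop: append int(data[max(0,end-4):end], 16), end -= 4; none = ValueError
def hex16LoopB (cs : List Char) (endI : Int) (out : List Int) : Option (List Int) :=
  if 0 < endI then
    match PySem.Int.ofCharsBase? (PySem.List.slice cs (some (max 0 (endI - 4))) (some endI)) 16 with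
    | none => none
    | some v => hex16LoopB cs (endI - 4) (out ++ [v])
  else some out
termination_by endI.toNat
decreasing_by omega

def get_hex16_value_alt (name : String) (keydata : List (String × List String)) : Option (List Int) :=
  match List.lookup name keydata with
  | none => none
  | some xs =>
    let cs := (PySem.Str.join "" xs).toList
    (hex16LoopB cs (cs.length : Int) []).map List.reverse   -- bit16.reverse(); return bit16

-- ===== PRECONDITION & SPEC =====
def hexDigits : List Char := ['0','1','2','3','4','5','6','7','8','9','a','b','c','d','e','f','A','B','C','D','E','F']

-- Pre_ excludes inputs whose joined data contains a non-hex-digit character: on most of those A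
-- raises ValueError, and where whitespace/sign/underscore characters happen to be accepted by
-- int(chunk, 16) A's returning at all is an accident of chunk alignment and zfill's sign handling
-- (B raises there or returns the same value).
def Pre_get_hex16_value (name : String) (keydata : List (String × List String)) : Prop :=
  match List.lookup name keydata with
  | none => True
  | some xs => ((PySem.Str.join "" xs).toList.all (fun c => hexDigits.contains c)) = true

instance (name : String) (keydata : List (String × List String)) : Decidable (Pre_get_hex16_value name keydata) := by
  unfold Pre_get_hex16_value; exact match List.lookup name keydata with
  | none => .isTrue trivial
  | some _ => inferInstance

def pvWitness_get_hex16_value : String × (List (String × List String)) :=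
  ("k", [("k", ["12", "3456"])])

def Spec_get_hex16_value (name : String) (keydata : List (String × List String)) (out : Option (List Int)) : Prop := out = get_hex16_value_alt name keydata
instance (name : String) (keydata : List (String × List String)) (out : Option (List Int)) : Decidable (Spec_get_hex16_value name keydata out) := by unfold Spec_get_hex16_value; infer_instance

-- ===== CLAIM (what is proved, stated in full; the proofs are below) =====
def Claim_equal_get_hex16_value : Prop := ∀ (name : String) (keydata : List (String × List String)), Dom_get_hex16_value name keydata → Pre_get_hex16_value name keydata → Spec_get_hex16_value name keydata (get_hex16_value name keydata)

-- ===== LEMMAS AND PROOFS =====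

-- leading '0's do not change int(·, 16) on hex-digit strings: exhaustive over the 22 hex chars
theorem pv_pad1b : (hexDigits.all fun c1 =>
    PySem.Int.ofCharsBase? ['0','0','0',c1] 16 == PySem.Int.ofCharsBase? [c1] 16) = true := by decide

theorem pv_pad2b : (hexDigits.all fun c1 => hexDigits.all fun c2 =>
    PySem.Int.ofCharsBase? ['0','0',c1,c2] 16 == PySem.Int.ofCharsBase? [c1,c2] 16) = true := by decide

set_option maxHeartbeats 4000000 in
theorem pv_pad3b : (hexDigits.all fun c1 => hexDigits.all fun c2 => hexDigits.all fun c3 =>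
    PySem.Int.ofCharsBase? ['0',c1,c2,c3] 16 == PySem.Int.ofCharsBase? [c1,c2,c3] 16) = true := by decide

theorem pv_pad1 (c1 : Char) (h1 : hexDigits.contains c1 = true) :
    PySem.Int.ofCharsBase? ['0','0','0',c1] 16 = PySem.Int.ofCharsBase? [c1] 16 := by
  have := List.all_eq_true.mp pv_pad1b c1 (by simpa using h1)
  exact beq_iff_eq.mp this

theorem pv_pad2 (c1 c2 : Char) (h1 : hexDigits.contains c1 = true) (h2 : hexDigits.contains c2 = true) :
    PySem.Int.ofCharsBase? ['0','0',c1,c2] 16 = PySem.Int.ofCharsBase? [c1,c2] 16 := by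
  have := List.all_eq_true.mp (List.all_eq_true.mp pv_pad2b c1 (by simpa using h1)) c2 (by simpa using h2)
  exact beq_iff_eq.mp this

theorem pv_pad3 (c1 c2 c3 : Char) (h1 : hexDigits.contains c1 = true) (h2 : hexDigits.contains c2 = true) (h3 : hexDigits.contains c3 = true) :
    PySem.Int.ofCharsBase? ['0',c1,c2,c3] 16 = PySem.Int.ofCharsBase? [c1,c2,c3] 16 := by
  have := List.all_eq_true.mp (List.all_eq_true.mp (List.all_eq_true.mp pv_pad3b c1 (by simpa using h1)) c2 (by simpa using h2)) c3 (by simpa using h3)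
  exact beq_iff_eq.mp this

-- proof-side reference: right-aligned chunking, structural recursion
def pvChunkR (cs : List Char) : Option (List Int) :=
  if cs.isEmpty then some []
  else
    match pvChunkR (cs.take (cs.length - 4)) with
    | none => none
    | some l =>
      match PySem.Int.ofCharsBase? (cs.drop (cs.length - 4)) 16 with
      | none => none
      | some v => some (l ++ [v])
termination_by cs.length
decreasing_by cases cs with | nil => simp_all | cons a l => simp only [List.length_take, List.length_cons]; omega

-- B's loop computes pvChunkR of the processed prefix, chunks accumulated in reverse
theorem pv_B_inv (k : Nat) : ∀ (cs : List Char) (out : List Int), k ≤ cs.length →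
    hex16LoopB cs (k : Int) out = (pvChunkR (cs.take k)).map (fun l => out ++ l.reverse) := by
  induction k using Nat.strong_induction_on with
  | _ k ih =>
    intro cs out hk
    rcases Nat.eq_zero_or_pos k with h0 | h0
    · subst h0
      rw [hex16LoopB.eq_def]
      simp [pvChunkR]
    · -- unfold one B step
      have hmax : max 0 ((k : Int) - 4) = ((k - 4 : Nat) : Int) := by omega
      have hlen : (cs.take k).length = k := by simp; omega
      have hchunk : PySem.List.slice cs (some (max 0 ((k : Int) - 4))) (some (k : Int))
          = (cs.take k).drop ((cs.take k).length - 4) := by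
        rw [hmax, PySem.List.slice_natCast, hlen, List.drop_take]
      have hfront : (cs.take k).take ((cs.take k).length - 4) = cs.take (k - 4) := by
        rw [hlen, List.take_take]
        congr 1
        omega
      rw [hex16LoopB.eq_def, if_pos (by exact_mod_cast h0), hchunk]
      rw [pvChunkR.eq_def (cs.take k)]
      rw [if_neg (by simp [← List.length_pos_iff_ne_nil]; omega)]
      rw [hfront]
      rcases hA : pvChunkR (cs.take (k - 4)) with _ | l
      · -- front chunking fails: both sides none
        rcases hp : PySem.Int.ofCharsBase? ((cs.take k).drop ((cs.take k).length - 4)) 16 with _ | v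
        · simp
        · rcases Nat.lt_or_ge k 5 with hk4 | hk4
          · have : ¬ (0 : Int) < (k : Int) - 4 := by omega
            simp only []
            rw [hex16LoopB.eq_def, if_neg this]
            -- but front = take (k-4) = take 0 = [] so pvChunkR front = some [], contradiction
            have : k - 4 = 0 := by omega
            rw [this] at hA
            simp [pvChunkR] at hA
          · have hcast : (k : Int) - 4 = ((k - 4 : Nat) : Int) := by omega
            simp only []
            rw [hcast, ih (k - 4) (by omega) cs (out ++ [v]) (by omega), hA]
            simp
      · rcases hp : PySem.Int.ofCharsBase? ((cs.take k).drop ((cs.take k).length - 4)) 16 with _ | v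
        · simp
        · rcases Nat.lt_or_ge k 5 with hk4 | hk4
          · have hneg : ¬ (0 : Int) < (k : Int) - 4 := by omega
            simp only []
            rw [hex16LoopB.eq_def, if_neg hneg]
            have h0' : k - 4 = 0 := by omega
            rw [h0'] at hA
            simp [pvChunkR] at hA
            subst hA
            simp
          · have hcast : (k : Int) - 4 = ((k - 4 : Nat) : Int) := by omega
            simp only []
            rw [hcast, ih (k - 4) (by omega) cs (out ++ [v]) (by omega), hA]
            simp

-- A's loop peels a trailing 4-chunk off a 4-aligned string
theorem pv_A_snoc (n : Nat) : ∀ (xs g : List Char) (acc : List Int), xs.length = n → xs.length % 4 = 0 → g.length = 4 →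
    hex16LoopA (xs ++ g) acc =
      match hex16LoopA xs acc with
      | none => none
      | some l => (PySem.Int.ofCharsBase? g 16).map (fun v => l ++ [v]) := by
  induction n using Nat.strong_induction_on with
  | _ n ih =>
    intro xs g acc hn hmod hg
    rcases Nat.eq_zero_or_pos n with h0 | h0
    · have hxs : xs = [] := by
        apply List.eq_nil_of_length_eq_zero; omega
      subst hxs
      have hgne : ¬ g.isEmpty := by
        cases g <;> simp_all
      have htk : g.take 4 = g := by
        rw [← hg]; exact List.take_length
      have hdp : g.drop 4 = [] := by
        apply List.eq_nil_of_length_eq_zero; simp [hg]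
      rw [List.nil_append, hex16LoopA.eq_def, if_neg (by simpa using hgne), htk, hdp]
      rcases hp : PySem.Int.ofCharsBase? g 16 with _ | v
      · simp [hex16LoopA]
      · simp only []
        rw [hex16LoopA.eq_def]
        simp [hex16LoopA]
    · have hn4 : 4 ≤ xs.length := by omega
      have hne : ¬ (xs ++ g).isEmpty := by
        cases xs <;> simp_all
      have htk : (xs ++ g).take 4 = xs.take 4 := List.take_append_of_le_length hn4
      have hdp : (xs ++ g).drop 4 = xs.drop 4 ++ g := List.drop_append_of_le_length hn4
      rw [hex16LoopA.eq_def, if_neg (by simpa using hne), htk, hdp]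
      rw [hex16LoopA.eq_def (cs := xs), if_neg (by simp [← List.length_pos_iff_ne_nil]; omega)]
      rcases hp : PySem.Int.ofCharsBase? (xs.take 4) 16 with _ | v
      · rfl
      · simp only []
        exact ih (n - 4) (by omega) (xs.drop 4) g (acc ++ [v]) (by simp; omega) (by simp; omega) hg

-- zfill on a string not starting with a sign is plain left-padding with '0'
theorem pv_zfill_pad (cs : List Char) (w : Int)
    (h : ∀ c ∈ cs.head?, ¬(c = '+' ∨ c = '-')) :
    PySem.Chars.zfill cs w = if w ≤ (cs.length : Int) then cs else List.replicate (w.toNat - cs.length) '0' ++ cs := by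
  unfold PySem.Chars.zfill
  by_cases hw : w ≤ (cs.length : Int)
  · simp [hw]
  · rw [if_neg hw, if_neg hw]
    cases cs with
    | nil => simp
    | cons c rest =>
      simp only []
      rw [if_neg (h c rfl)]

-- a single (padded) chunk of exactly 4 characters
theorem pv_one_chunk (pre cs : List Char) (h4 : (pre ++ cs).length = 4) (hne : cs ≠ [])
    (hpad : PySem.Int.ofCharsBase? (pre ++ cs) 16 = PySem.Int.ofCharsBase? cs 16) :
    hex16LoopA (pre ++ cs) [] = pvChunkR cs := by
  have hlen : pre.length + cs.length = 4 := by simpa using h4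
  have htk : (pre ++ cs).take 4 = pre ++ cs := by rw [← h4, List.take_length]
  have hdp : (pre ++ cs).drop 4 = [] := by
    apply List.eq_nil_of_length_eq_zero; simp; omega
  have hne' : (pre ++ cs) ≠ [] := by
    intro h; rw [h] at h4; simp at h4
  rw [hex16LoopA.eq_def, if_neg (by simpa using hne'), htk, hdp, hpad]
  rw [pvChunkR.eq_def, if_neg (by simpa using hne)]
  have h0 : cs.length - 4 = 0 := by omega
  rw [h0]
  simp only [List.take_zero, List.drop_zero]
  rcases hp : PySem.Int.ofCharsBase? cs 16 with _ | v <;> simp [hex16LoopA, pvChunkR]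

-- main: A's padded left-to-right loop equals the right-aligned chunking, on hex-digit data
theorem pv_main (n : Nat) : ∀ (cs : List Char), cs.length = n → (cs.all (fun c => hexDigits.contains c)) = true →
    hex16LoopA (if cs.length % 4 ≠ 0 then PySem.Chars.zfill cs ((cs.length : Int) + 4 - (cs.length : Int) % 4) else cs) []
      = pvChunkR cs := by
  induction n using Nat.strong_induction_on with
  | _ n ih =>
    intro cs hn hhex
    rcases Nat.eq_zero_or_pos n with h0 | h0
    · have hcs : cs = [] := by apply List.eq_nil_of_length_eq_zero; omega
      subst hcs
      simp [hex16LoopA, pvChunkR]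
    · have hhead : ∀ c ∈ cs.head?, ¬(c = '+' ∨ c = '-') := by
        intro c hc
        have hmem : c ∈ cs := by
          cases cs with
          | nil => simp at hc
          | cons a l => simp at hc; subst hc; exact List.mem_cons_self
        have := List.all_eq_true.mp hhex c hmem
        simp only [List.contains_eq_mem, decide_eq_true_eq] at this
        intro h'
        rcases h' with h' | h' <;> subst h' <;> simp [hexDigits] at this
      rcases Nat.lt_or_ge n 4 with hn4 | hn4
      · -- 1 ≤ n ≤ 3 : one zfilled chunk vs the raw short chunk
        have hf : cs.length % 4 = n := by omega
        have hw : (cs.length : Int) + 4 - (cs.length : Int) % 4 = 4 := by omega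
        have hrep : (4 : Int).toNat - cs.length = 4 - n := by omega
        rw [if_pos (by omega), hw, pv_zfill_pad cs 4 hhead, if_neg (by omega), hrep]
        have hcne : cs ≠ [] := by intro h; rw [h] at hn; simp at hn; omega
        apply pv_one_chunk _ _ (by simp; omega) hcne
        interval_cases n
        · rcases cs with _ | ⟨c1, t⟩
          · simp at hn
          · rcases t with _ | ⟨c2, t⟩
            · have h1 := List.all_eq_true.mp hhex c1 (by simp)
              simpa using pv_pad1 c1 (by simpa using h1)
            · simp at hn
        · rcases cs with _ | ⟨c1, t⟩
          · simp at hn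
          · rcases t with _ | ⟨c2, t⟩
            · simp at hn
            · rcases t with _ | ⟨c3, t⟩
              · have h1 := List.all_eq_true.mp hhex c1 (by simp)
                have h2 := List.all_eq_true.mp hhex c2 (by simp)
                simpa using pv_pad2 c1 c2 (by simpa using h1) (by simpa using h2)
              · simp at hn
        · rcases cs with _ | ⟨c1, t⟩
          · simp at hn
          · rcases t with _ | ⟨c2, t⟩
            · simp at hn
            · rcases t with _ | ⟨c3, t⟩
              · simp at hn
              · rcases t with _ | ⟨c4, t⟩
                · have h1 := List.all_eq_true.mp hhex c1 (by simp)
                  have h2 := List.all_eq_true.mp hhex c2 (by simp)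
                  have h3 := List.all_eq_true.mp hhex c3 (by simp)
                  simpa using pv_pad3 c1 c2 c3 (by simpa using h1) (by simpa using h2) (by simpa using h3)
                · simp at hn
      · -- n ≥ 4 : split off the trailing 4 characters and use the IH on the front
        set front := cs.take (cs.length - 4) with hfr
        set g := cs.drop (cs.length - 4) with hg
        have hsplit : cs = front ++ g := (List.take_append_drop _ cs).symm
        have hgl : g.length = 4 := by simp [hg]; omega
        have hfl : front.length = n - 4 := by simp [hfr]; omega
        have hfmod : front.length % 4 = n % 4 := by omega
        have hfhex : (front.all (fun c => hexDigits.contains c)) = true := by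
          exact List.all_eq_true.mpr fun x hx => List.all_eq_true.mp hhex x (List.take_subset _ _ hx)
        have hIH := ih (n - 4) (by omega) front hfl hfhex
        -- RHS unfolds to the front/last-chunk match
        have hRHS : pvChunkR cs =
            match pvChunkR front with
            | none => none
            | some l =>
              match PySem.Int.ofCharsBase? g 16 with
              | none => none
              | some v => some (l ++ [v]) := by
          rw [pvChunkR.eq_def]
          rw [if_neg (by simp [← List.length_pos_iff_ne_nil]; omega), ← hfr, ← hg]
        rcases Nat.eq_zero_or_pos (n % 4) with hf0 | hf0
        · -- aligned: no padding on either level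
          rw [if_neg (by omega)]
          rw [if_neg (by omega)] at hIH
          rw [hsplit, pv_A_snoc front.length front g [] rfl (by omega) hgl, hIH, ← hsplit, hRHS]
          rcases pvChunkR front with _ | l <;> [skip; rcases PySem.Int.ofCharsBase? g 16 with _ | v] <;> simp
        · -- unaligned: zfill of cs is zfill of front with the same zeros, followed by g
          have hlen : (cs.length : Int) + 4 - (cs.length : Int) % 4 > (cs.length : Int) := by omega
          rw [if_pos (by omega), pv_zfill_pad cs _ hhead, if_neg (by omega)]
          have hfhead : ∀ c ∈ front.head?, ¬(c = '+' ∨ c = '-') := by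
            intro c hc
            have hmem : c ∈ cs := List.take_subset _ _ (List.mem_of_mem_head? hc)
            have := List.all_eq_true.mp hhex c hmem
            simp only [List.contains_eq_mem, decide_eq_true_eq] at this
            intro h'
            rcases h' with h' | h' <;> subst h' <;> simp [hexDigits] at this
          rw [if_pos (by omega)] at hIH
          rw [pv_zfill_pad front _ hfhead, if_neg (by omega)] at hIH
          have hz : ((cs.length : Int) + 4 - (cs.length : Int) % 4).toNat - cs.length = 4 - n % 4 := by
            omega
          have hz' : (((front.length : Int)) + 4 - ((front.length : Int)) % 4).toNat - front.length
              = 4 - n % 4 := by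
            omega
          rw [hz]
          rw [hz'] at hIH
          have hre : List.replicate (4 - n % 4) '0' ++ cs
              = (List.replicate (4 - n % 4) '0' ++ front) ++ g := by
            rw [List.append_assoc, ← hsplit]
          rw [hre, pv_A_snoc _ (List.replicate (4 - n % 4) '0' ++ front) g [] rfl
              (by simp [hfl]; omega) hgl, hIH, hRHS]
          rcases pvChunkR front with _ | l <;> [skip; rcases PySem.Int.ofCharsBase? g 16 with _ | v] <;> simp

-- ===== VERDICT (by name: the statement is the Claim_ definition above) =====
theorem get_hex16_value_spec : Claim_equal_get_hex16_value := by
  intro name keydata _ hpre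
  unfold Spec_get_hex16_value get_hex16_value get_hex16_value_alt get_hexc_value
  unfold Pre_get_hex16_value at hpre
  rcases hlk : List.lookup name keydata with _ | xs
  · rfl
  · rw [hlk] at hpre
    simp only
    rw [pv_B_inv ((PySem.Str.join "" xs).toList.length) _ [] le_rfl, List.take_length]
    rw [pv_main _ _ rfl hpre]
    cases pvChunkR (PySem.Str.join "" xs).toList <;> simp
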